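-- pv_equiv track=rewrite | github.com/voicetreelab/voicetree | backend/text_to_graph_pipeline/tree_manager/node_processor.py | _remove_frontmatter
-- ===== SOURCE A (Python) =====
-- def _remove_frontmatter(content: str) -> str:
--     """
--     Remove YAML frontmatter from markdown content.
--
--     Args:
--         content: Markdown content with frontmatter
--
--     Returns:
--         Content without frontmatter
--     """
--     lines = content.strip().split('\n')
--
--     # Check if content starts with frontmatter
--     if not lines or lines[0] != '---':
--         return content
--
--     # Find end of frontmatter
--     end_index = None
--     for i, line in enumerate(lines[1:], 1):
--         if line == '---':
--             end_index = i
--             break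
--
--     if end_index is None:
--         return content
--
--     # Return content after frontmatter
--     remaining_lines = lines[end_index + 1:]
--     return '\n'.join(remaining_lines)
-- ===== SOURCE B (Python) =====
-- def _remove_frontmatter(content: str) -> str:
--     """Remove YAML frontmatter from markdown content (delimiter-search version)."""
--     stripped = content.strip()
--     if not stripped.startswith('---\n'):
--         return content
--     rest = stripped[4:]
--     k = ('\n' + rest + '\n').find('\n---\n')
--     if k == -1:
--         return content
--     return rest[k + 4:]
-- ===== Notes on version B (the rewrite author's own statement) =====
-- stated objective: alternative
-- what changed: B drops A's split-into-a-list-of-lines-plus-scan entirely: it strips once, checks the opening dash line with startswith, and locates the closing dash line with a single substring search in the newline-padded remainder, slicing the answer straight out of the string.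
import Mathlib
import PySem

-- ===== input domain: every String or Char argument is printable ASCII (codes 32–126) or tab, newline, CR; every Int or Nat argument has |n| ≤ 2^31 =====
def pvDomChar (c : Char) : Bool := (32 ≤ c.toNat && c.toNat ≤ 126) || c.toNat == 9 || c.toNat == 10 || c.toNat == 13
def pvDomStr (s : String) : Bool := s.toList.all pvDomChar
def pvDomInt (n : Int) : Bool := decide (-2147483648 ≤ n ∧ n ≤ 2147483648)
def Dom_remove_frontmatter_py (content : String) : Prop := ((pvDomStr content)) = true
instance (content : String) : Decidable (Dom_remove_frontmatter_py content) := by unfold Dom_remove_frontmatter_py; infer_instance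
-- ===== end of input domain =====

-- B replaces A's split-into-lines-and-scan with a single delimiter-substring search on the
-- stripped text; same return value by a different traversal (objective: alternative).

-- ===== PORT A =====
-- the loop 'for i, line in enumerate(lines[1:], 1): if line == "---": end_index = i; break'
def pvFindEnd : List (List Char) → Nat → Option Nat
  | [], _ => none
  | line :: t, i => if line = ['-', '-', '-'] then some i else pvFindEnd t (i + 1)

def remove_frontmatter_py (content : String) : String :=
  let lines := PySem.Chars.splitOn (PySem.Chars.strip content.toList) ['\n']
  if lines = [] ∨ lines.headD [] ≠ ['-', '-', '-'] then content
  else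
    match pvFindEnd (PySem.List.slice lines (some 1) none) 1 with
    | none => content
    | some endIndex =>
        String.ofList (PySem.Chars.join ['\n']
          (PySem.List.slice lines (some ((endIndex : Int) + 1)) none))

-- ===== PORT B =====
def remove_frontmatter_py_alt (content : String) : String :=
  let stripped := PySem.Chars.strip content.toList
  if PySem.Chars.startswith stripped ['-', '-', '-', '\n'] = false then content
  else
    let rest := PySem.List.slice stripped (some 4) none
    let k := PySem.Chars.find ('\n' :: (rest ++ ['\n'])) ['\n', '-', '-', '-', '\n']
    if k = -1 then content
    else String.ofList (PySem.List.slice rest (some (k + 4)) none)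

-- ===== PRECONDITION & SPEC =====
def Spec_remove_frontmatter_py (content : String) (out : String) : Prop := out = remove_frontmatter_py_alt content
instance (content : String) (out : String) : Decidable (Spec_remove_frontmatter_py content out) := by unfold Spec_remove_frontmatter_py; infer_instance

-- ===== CLAIM (what is proved, stated in full; the proofs are below) =====
def Claim_equal_remove_frontmatter_py : Prop := ∀ (content : String), Dom_remove_frontmatter_py content → Spec_remove_frontmatter_py content (remove_frontmatter_py content)

-- ===== LEMMAS AND PROOFS =====

def mySplit : List Char → List Char → List (List Char)
  | pre, [] => [pre]
  | pre, c :: t => if c = '\n' then pre :: mySplit [] t else mySplit (pre ++ [c]) t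

lemma go_eq : ∀ (l : List Char) (fuel : Nat) (cur : List Char) (acc : List (List Char)),
    l.length < fuel →
    PySem.Chars.splitOn.go ['\n'] fuel l cur acc = acc.reverse ++ mySplit cur.reverse l := by
  intro l
  induction l with
  | nil =>
    intro fuel cur acc hf
    match fuel, hf with
    | fuel + 1, _ => simp [PySem.Chars.splitOn.go, mySplit]
  | cons c t ih =>
    intro fuel cur acc hf
    match fuel, hf with
    | fuel + 1, hf =>
      simp only [PySem.Chars.splitOn.go]
      by_cases hc : c = '\n'
      · subst hc
        simp only [List.isPrefixOf, BEq.rfl, Bool.true_and, if_true, List.length_cons, List.length_nil, List.drop_succ_cons, List.drop_zero]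
        rw [ih _ _ _ (by simpa using Nat.lt_of_succ_lt_succ hf)]
        simp [mySplit]
      · have : (['\n'].isPrefixOf (c :: t)) = false := by
          simp [List.isPrefixOf]; intro h; exact absurd h.symm hc
        rw [this]
        simp only [if_false, Bool.false_eq_true]
        rw [ih _ _ _ (by simpa using Nat.lt_of_succ_lt_succ hf)]
        simp [mySplit, hc]

lemma splitOn_eq_mySplit (s : List Char) : PySem.Chars.splitOn s ['\n'] = mySplit [] s := by
  have := go_eq s (s.length + 1) [] [] (by omega)
  simpa [PySem.Chars.splitOn] using this

lemma mySplit_no_nl (a : List Char) : ∀ pre, '\n' ∉ a → mySplit pre a = [pre ++ a] := by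
  induction a with
  | nil => intro pre _; simp [mySplit]
  | cons c t ih =>
    intro pre h
    simp only [List.mem_cons, not_or] at h
    simp [mySplit, Ne.symm h.1, ih _ h.2]

lemma mySplit_append (a : List Char) : ∀ pre (r : List Char), '\n' ∉ a →
    mySplit pre (a ++ '\n' :: r) = (pre ++ a) :: mySplit [] r := by
  induction a with
  | nil => intro pre r _; simp [mySplit]
  | cons c t ih =>
    intro pre r h
    simp only [List.mem_cons, not_or] at h
    simp [mySplit, Ne.symm h.1, ih _ _ h.2]

lemma head?_mySplit (s : List Char) : ∀ pre, (mySplit pre s).head? = some (pre ++ s.takeWhile (· ≠ '\n')) := by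
  induction s with
  | nil => intro pre; simp [mySplit]
  | cons c t ih =>
    intro pre
    by_cases hc : c = '\n'
    · subst hc; simp [mySplit, List.takeWhile]
    · simp [mySplit, hc, ih]

lemma join_mySplit (r : List Char) : ∀ pre, PySem.Chars.join ['\n'] (mySplit pre r) = pre ++ r := by
  induction r with
  | nil => intro pre; simp [mySplit, PySem.Chars.join, List.intercalate]
  | cons c t ih =>
    intro pre
    by_cases hc : c = '\n'
    · subst hc
      simp only [mySplit, if_true]
      have hne : mySplit [] t ≠ [] := by
        intro h
        have := head?_mySplit t []
        rw [h] at this; simp at this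
      rcases ht : mySplit [] t with _ | ⟨x, xs⟩
      · exact absurd ht hne
      · rw [PySem.Chars.join_cons_cons]
        have := ih []
        rw [ht] at this
        simp only [List.nil_append] at this
        rw [this]
        simp
    · simp only [mySplit, hc, if_false]
      rw [ih]; simp


lemma pvFindEnd_shift (ls : List (List Char)) : ∀ n, pvFindEnd ls n = (pvFindEnd ls 0).map (· + n) := by
  induction ls with
  | nil => intro n; simp [pvFindEnd]
  | cons l t ih =>
    intro n
    by_cases h : l = ['-', '-', '-']
    · simp [pvFindEnd, h]
    · simp only [pvFindEnd, h, if_false]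
      rw [ih (n + 1), ih 1]
      cases pvFindEnd t 0
      · simp
      · simp
        omega

-- find points at p when p is the first match position
lemma find_eq_at (s sub : List Char) (p : Nat) (hp : sub <+: s.drop p)
    (hmin : ∀ i < p, ¬ sub <+: s.drop i) : PySem.Chars.find s sub = (p : Int) := by
  have hinf : sub <:+: s := (hp.isInfix).trans (List.drop_suffix p s).isInfix
  have hne : PySem.Chars.find s sub ≠ -1 := (PySem.Chars.find_ne_neg_one_iff s sub).mpr hinf
  have hnn : 0 ≤ PySem.Chars.find s sub := (PySem.Chars.find_nonneg_iff s sub).mpr hinf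
  obtain ⟨h1, h2⟩ := PySem.Chars.find_spec (s := s) (sub := sub) hnn
  rcases lt_trichotomy (PySem.Chars.find s sub).toNat p with h | h | h
  · exact absurd h1 (hmin _ h)
  · omega
  · exact absurd hp (h2 _ h)

-- skipping a matchless zone: find on s versus find on s.drop m
lemma find_skip (s sub : List Char) (m : Nat) (h : ∀ i < m, ¬ sub <+: s.drop i) :
    PySem.Chars.find s sub =
      (if PySem.Chars.find (s.drop m) sub = -1 then -1
       else (m : Int) + PySem.Chars.find (s.drop m) sub) := by
  by_cases hd : PySem.Chars.find (s.drop m) sub = -1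
  · rw [if_pos hd]
    have hni : ¬ sub <:+: s.drop m := (PySem.Chars.find_eq_neg_one_iff _ _).mp hd
    rw [PySem.Chars.find_eq_neg_one_iff]
    intro hinf
    obtain ⟨j, hj⟩ := (PySem.Chars.exists_prefix_drop_iff_isIn sub s).mpr
      ((PySem.Chars.isIn_iff_infix sub s).mpr hinf)
    by_cases hjm : j < m
    · exact h j hjm hj
    · apply hni
      have hj' : sub <+: (s.drop m).drop (j - m) := by
        rw [List.drop_drop, Nat.add_sub_cancel' (by omega)]; exact hj
      exact hj'.isInfix.trans (List.drop_suffix _ _).isInfix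
  · rw [if_neg hd]
    have hnn : 0 ≤ PySem.Chars.find (s.drop m) sub := by
      have := PySem.Chars.neg_one_le_find (s.drop m) sub
      omega
    obtain ⟨h1, h2⟩ := PySem.Chars.find_spec (s := s.drop m) (sub := sub) hnn
    set k := (PySem.Chars.find (s.drop m) sub).toNat with hk
    have : PySem.Chars.find s sub = ((m + k : Nat) : Int) := by
      apply find_eq_at
      · rw [List.drop_drop] at h1
        exact h1
      · intro i hi
        by_cases him : i < m
        · exact h i him
        · intro hpre
          have : sub <+: (s.drop m).drop (i - m) := by
            rw [List.drop_drop, Nat.add_sub_cancel' (by omega)]; exact hpre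
          exact h2 (i - m) (by omega) this
    rw [this]; push_cast; omega

lemma prefix_dashes (a z : List Char) (h : '\n' ∉ a) :
    ['-', '-', '-', '\n'] <+: a ++ '\n' :: z ↔ a = ['-', '-', '-'] := by
  constructor
  · intro hp
    rcases a with _ | ⟨c1, _ | ⟨c2, _ | ⟨c3, _ | ⟨c4, t⟩⟩⟩⟩ <;>
      simp_all [List.cons_prefix_cons, eq_comm]
  · rintro rfl
    simp [List.cons_prefix_cons]

lemma no_match_mid (a z : List Char) (i : Nat) (h : '\n' ∉ a) (h1 : 1 ≤ i) (h2 : i ≤ a.length) :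
    ¬ ['\n', '-', '-', '-', '\n'] <+: ('\n' :: (a ++ z)).drop i := by
  intro hp
  have hi : i - 1 < a.length := by omega
  obtain ⟨i', rfl⟩ : ∃ i', i = i' + 1 := ⟨i - 1, by omega⟩
  rw [List.drop_succ_cons, List.drop_append_of_le_length (by omega),
      List.drop_eq_getElem_cons (by omega), List.cons_append] at hp
  have := (List.cons_prefix_cons.mp hp).1
  exact h (this ▸ List.getElem_mem _)

def SUB : List Char := ['\n', '-', '-', '-', '\n']

def STMT (rest : List Char) : Prop :=
  (pvFindEnd (mySplit [] rest) 0 = none ∧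
     PySem.Chars.find ('\n' :: (rest ++ ['\n'])) SUB = -1)
  ∨ (∃ j p : Nat, pvFindEnd (mySplit [] rest) 0 = some j ∧
     PySem.Chars.find ('\n' :: (rest ++ ['\n'])) SUB = (p : Int) ∧
     rest.drop (p + 4) = PySem.Chars.join ['\n'] ((mySplit [] rest).drop (j + 1)))

lemma case_a (a : List Char) (h : '\n' ∉ a) : STMT a := by
  by_cases ha : a = ['-', '-', '-']
  · subst ha
    right
    refine ⟨0, 0, by simp [mySplit, pvFindEnd], ?_, ?_⟩
    · exact find_eq_at _ _ 0 (by simp [SUB]) (by omega)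
    · simp [mySplit, PySem.Chars.join, List.intercalate]
  · left
    constructor
    · rw [mySplit_no_nl a [] h]
      simp [pvFindEnd, ha]
    · rw [PySem.Chars.find_eq_neg_one_iff]
      intro hinf
      obtain ⟨i, hi⟩ := (PySem.Chars.exists_prefix_drop_iff_isIn SUB ('\n' :: (a ++ ['\n']))).mpr
        ((PySem.Chars.isIn_iff_infix _ _).mpr hinf)
      rcases Nat.lt_or_ge i 1 with h1 | h1
      · interval_cases i
        simp only [List.drop_zero] at hi
        have : ['-', '-', '-', '\n'] <+: a ++ '\n' :: [] :=
          (List.cons_prefix_cons.mp hi).2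
        rw [prefix_dashes a [] h] at this
        exact ha this
      · by_cases h2 : i ≤ a.length
        · exact no_match_mid a ['\n'] i h h1 h2 hi
        · have hlen := hi.length_le
          simp [SUB] at hlen
          have : (List.drop i ('\n' :: (a ++ ['\n']))).length = a.length + 2 - i := by
            simp
          omega

lemma dropWhile_head_false (p : Char → Bool) (l r : List Char) (c : Char)
    (h : l.dropWhile p = c :: r) : p c = false := by
  induction l with
  | nil => simp at h
  | cons x t ih =>
    rw [List.dropWhile_cons] at h
    by_cases hp : p x
    · simp [hp] at h; exact ih h
    · simp [hp] at h
      rcases h with ⟨rfl, -⟩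
      simpa using hp

lemma main : ∀ (n : Nat) (rest : List Char), rest.length ≤ n → STMT rest := by
  intro n
  induction n with
  | zero =>
    intro rest hl
    have : rest = [] := List.eq_nil_of_length_eq_zero (by omega)
    subst this
    exact case_a [] (by simp)
  | succ n ih =>
    intro rest hl
    rcases hd : rest.dropWhile (· ≠ '\n') with _ | ⟨c, r⟩
    · -- no newline in rest
      have hres : rest.takeWhile (· ≠ '\n') = rest := by
        have h0 := List.takeWhile_append_dropWhile (p := (· ≠ '\n')) (l := rest)
        rw [hd, List.append_nil] at h0
        exact h0
      have hnn : '\n' ∉ rest := by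
        intro hm
        have h2 := List.mem_takeWhile_imp (p := fun x => decide (x ≠ '\n')) (l := rest)
          (x := '\n') (by rw [hres]; exact hm)
        simp at h2
      exact case_a rest hnn
    · -- rest = a ++ '\n' :: r
      have hc : c = '\n' := by
        have := dropWhile_head_false _ _ _ _ hd
        simpa using this
      subst hc
      set a := rest.takeWhile (· ≠ '\n') with hadef
      have hnn : '\n' ∉ a := by
        intro hm
        have h2 := List.mem_takeWhile_imp hm
        simp at h2
      have hsplit : rest = a ++ '\n' :: r := by
        have h0 := List.takeWhile_append_dropWhile (p := (· ≠ '\n')) (l := rest)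
        rw [hd] at h0
        exact h0.symm
      have hlenr : r.length ≤ n := by
        have := congrArg List.length hsplit
        simp at this
        omega
      have hms : mySplit [] rest = a :: mySplit [] r := by
        rw [hsplit, mySplit_append a [] r hnn]; simp
      by_cases ha : a = ['-', '-', '-']
      · right
        refine ⟨0, 0, ?_, ?_, ?_⟩
        · rw [hms]; simp [pvFindEnd, ha]
        · apply find_eq_at _ _ 0 _ (by omega)
          rw [hsplit, ha]
          simp [SUB]
        · rw [hms]
          simp only [Nat.zero_add, List.drop_succ_cons, List.drop_zero]
          rw [join_mySplit r [], hsplit, ha]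
          simp
      · -- skip the first line (it is not '---')
        have hnomatch : ∀ i < a.length + 1, ¬ SUB <+: (('\n' :: (rest ++ ['\n']))).drop i := by
          intro i hi hp
          rcases Nat.lt_or_ge i 1 with h1 | h1
          · interval_cases i
            simp only [List.drop_zero] at hp
            have hpre : ['-', '-', '-', '\n'] <+: a ++ '\n' :: (r ++ ['\n']) := by
              have h2 := (List.cons_prefix_cons.mp hp).2
              rw [hsplit] at h2
              simpa using h2
            rw [prefix_dashes a _ hnn] at hpre
            exact ha hpre
          · apply no_match_mid a ('\n' :: (r ++ ['\n'])) i hnn h1 (by omega)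
            have heq : rest ++ ['\n'] = a ++ ('\n' :: (r ++ ['\n'])) := by rw [hsplit]; simp
            rw [← heq]
            exact hp
        have hskip := find_skip ('\n' :: (rest ++ ['\n'])) SUB (a.length + 1) hnomatch
        have hdropm : (('\n' :: (rest ++ ['\n']))).drop (a.length + 1) = '\n' :: (r ++ ['\n']) := by
          rw [hsplit]
          have heq : (a ++ '\n' :: r) ++ ['\n'] = a ++ ('\n' :: (r ++ ['\n'])) := by simp
          rw [heq, List.drop_succ_cons, List.drop_left]
        rw [hdropm] at hskip
        have hfe : pvFindEnd (mySplit [] rest) 0 = (pvFindEnd (mySplit [] r) 0).map (· + 1) := by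
          rw [hms]
          simp only [pvFindEnd, ha, if_false]
          exact pvFindEnd_shift (mySplit [] r) 1
        rcases ih r hlenr with ⟨hfn, hff⟩ | ⟨j, p, hj, hp, heq⟩
        · left
          constructor
          · rw [hfe, hfn]; rfl
          · rw [hskip, hff]; simp
        · right
          refine ⟨j + 1, a.length + 1 + p, ?_, ?_, ?_⟩
          · rw [hfe, hj]; rfl
          · rw [hskip, hp]
            have : ((p : Int)) ≠ -1 := by omega
            rw [if_neg this]
            push_cast
            ring
          · rw [hms]
            simp only [List.drop_succ_cons]
            rw [← heq, hsplit]
            have harr : a.length + 1 + p + 4 = a.length + (p + 5) := by omega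
            rw [harr, ← List.drop_drop, List.drop_left]
            simp only [List.drop_succ_cons]

lemma final (content : String) :
    remove_frontmatter_py content = remove_frontmatter_py_alt content := by
  unfold remove_frontmatter_py remove_frontmatter_py_alt
  simp only [splitOn_eq_mySplit]
  set s := PySem.Chars.strip content.toList with hs
  by_cases hsw : PySem.Chars.startswith s ['-', '-', '-', '\n'] = false
  · -- B returns content; show A does too
    rw [if_pos hsw]
    by_cases hg : mySplit [] s = [] ∨ (mySplit [] s).headD [] ≠ ['-', '-', '-']
    · rw [if_pos hg]
    · rw [if_neg hg]
      push Not at hg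
      obtain ⟨hne, hhd⟩ := hg
      have hhead : s.takeWhile (· ≠ '\n') = ['-', '-', '-'] := by
        have h0 := head?_mySplit s []
        rcases hms : mySplit [] s with _ | ⟨x, xs⟩
        · exact absurd hms hne
        · rw [hms, List.head?_cons, List.nil_append] at h0
          rw [hms] at hhd
          simp only [List.headD_cons] at hhd
          rw [← Option.some.inj h0, hhd]
      rcases hdw : s.dropWhile (· ≠ '\n') with _ | ⟨c, r⟩
      · -- s = "---"
        have hseq : s = ['-', '-', '-'] := by
          have h0 := List.takeWhile_append_dropWhile (p := (· ≠ '\n')) (l := s)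
          rw [hdw, hhead, List.append_nil] at h0
          exact h0.symm
        rw [hseq]
        have : mySplit [] ['-', '-', '-'] = [['-', '-', '-']] := by
          simp [mySplit]
        rw [this]
        simp [pysem, pvFindEnd]
      · -- first line is '---' followed by '\n': contradicts hsw
        exfalso
        have hc : c = '\n' := by
          have := dropWhile_head_false _ _ _ _ hdw
          simpa using this
        subst hc
        have hseq : s = ['-', '-', '-', '\n'] ++ r := by
          have h0 := List.takeWhile_append_dropWhile (p := (· ≠ '\n')) (l := s)
          rw [hdw, hhead] at h0
          rw [← h0]
          simp
        have : PySem.Chars.startswith s ['-', '-', '-', '\n'] = true :=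
          (PySem.Chars.startswith_iff s _).mpr ⟨r, by rw [hseq]⟩
        rw [this] at hsw
        exact absurd hsw (by simp)
  · -- frontmatter present: both sides follow `main`
    rw [if_neg hsw]
    rw [Bool.not_eq_false] at hsw
    obtain ⟨rest0, hrest⟩ := (PySem.Chars.startswith_iff s _).mp hsw
    have hseq : s = ['-', '-', '-'] ++ '\n' :: rest0 := by rw [← hrest]; rfl
    have hms : mySplit [] s = ['-', '-', '-'] :: mySplit [] rest0 := by
      rw [hseq, mySplit_append _ _ _ (by simp)]; rfl
    rw [hms]
    rw [if_neg (by simp)]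
    have hslice1 : PySem.List.slice (['-', '-', '-'] :: mySplit [] rest0) (some 1) none
        = mySplit [] rest0 := by
      simpa using PySem.List.slice_from (['-', '-', '-'] :: mySplit [] rest0) (a := 1) (by norm_num)
    have hrest4 : PySem.List.slice s (some 4) none = rest0 := by
      rw [hseq]
      simpa using PySem.List.slice_from (['-', '-', '-'] ++ '\n' :: rest0) (a := 4) (by norm_num)
    rw [hslice1, hrest4, pvFindEnd_shift]
    rcases main rest0.length rest0 (le_refl _) with ⟨hfn, hff⟩ | ⟨j, p, hj, hp, heq⟩
    · rw [hfn]
      have : PySem.Chars.find ('\n' :: (rest0 ++ ['\n'])) ['\n', '-', '-', '-', '\n'] = -1 := hff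
      rw [this]
      simp
    · rw [hj]
      have hp' : PySem.Chars.find ('\n' :: (rest0 ++ ['\n'])) ['\n', '-', '-', '-', '\n'] = (p : Int) := hp
      rw [hp']
      have hne : ((p : Int)) ≠ -1 := by omega
      rw [if_neg hne]
      simp only [Option.map_some]
      congr 1
      have h1 : PySem.List.slice (['-', '-', '-'] :: mySplit [] rest0) (some (((j + 1 : Nat) : Int) + 1)) none = (mySplit [] rest0).drop (j + 1) := by
        have h3 : ((j + 1 : Nat) : Int) + 1 = ((j + 2 : Nat) : Int) := by push_cast; ring
        rw [h3]
        simpa using PySem.List.slice_from_natCast (['-', '-', '-'] :: mySplit [] rest0) (j + 2)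
      have h2 : PySem.List.slice rest0 (some ((p : Int) + 4)) none = rest0.drop (p + 4) := by
        have h3 : ((p : Int)) + 4 = ((p + 4 : Nat) : Int) := by push_cast; ring
        rw [h3]
        simpa using PySem.List.slice_from_natCast rest0 (p + 4)
      rw [h1, h2]
      exact heq.symm

-- ===== VERDICT (by name: the statement is the Claim_ definition above) =====
theorem remove_frontmatter_py_spec : Claim_equal_remove_frontmatter_py := by
  intro content _
  unfold Spec_remove_frontmatter_py
  exact final content
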